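-- pv_equiv track=rewrite | github.com/Fujio-Turner/Apollo | graph/incremental.py | _compute_affected_files
-- ===== SOURCE A (Python) =====
-- def _compute_affected_files(
--     dirty_files: set[str],
--     dep_index: dict[str, set[str]],
--     max_hops: int = 1,
-- ) -> set[str]:
--     """
--     Compute affected files: dirty files + N-hop dependents.
--
--     Args:
--         dirty_files: Files that changed
--         dep_index: Reverse-dependency index (file -> files that depend on it)
--         max_hops: Maximum dependency hops to expand (1 = direct only)
--
--     Returns:
--         Set of all affected file paths
--     """
--     affected = set(dirty_files)
--     current_frontier = set(dirty_files)
--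
--     for hop in range(max_hops):
--         next_frontier = set()
--         for file_path in current_frontier:
--             # Find all files that depend on this file
--             dependents = dep_index.get(file_path, set())
--             for dependent in dependents:
--                 if dependent not in affected:
--                     next_frontier.add(dependent)
--                     affected.add(dependent)
--
--         if not next_frontier:
--             break  # No more dependents
--         current_frontier = next_frontier
--
--     return affected
-- ===== SOURCE B (Python) =====
-- from collections import deque
--
--
-- def _compute_affected_files(
--     dirty_files: set[str],
--     dep_index: dict[str, set[str]],
--     max_hops: int = 1,
-- ) -> set[str]:
--     """Dirty files + N-hop dependents, via a single FIFO worklist.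
--
--     Instead of level-synchronous frontier/next-frontier passes, one deque of
--     (file, depth) pairs drives the whole expansion: pop a pair, and if its
--     depth allows another hop, enqueue each not-yet-seen dependent one level
--     deeper while marking it affected.
--     """
--     affected = set(dirty_files)
--     queue = deque((f, 0) for f in dirty_files)
--     while queue:
--         file_path, depth = queue.popleft()
--         if depth < max_hops:
--             for dependent in dep_index.get(file_path, ()):
--                 if dependent not in affected:
--                     affected.add(dependent)
--                     queue.append((dependent, depth + 1))
--     return affected
-- ===== Notes on version B (the rewrite author's own statement) =====
-- stated objective: alternative
-- what changed: Replaces the level-synchronous BFS (hop loop over a frontier set, building a next_frontier per pass, break when empty) by a single FIFO worklist of (file, depth) pairs: one while-loop pops a pair and, when depth < max_hops, enqueues each unseen dependent at depth+1; no frontier sets and no hop counter loop.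
import Mathlib
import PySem

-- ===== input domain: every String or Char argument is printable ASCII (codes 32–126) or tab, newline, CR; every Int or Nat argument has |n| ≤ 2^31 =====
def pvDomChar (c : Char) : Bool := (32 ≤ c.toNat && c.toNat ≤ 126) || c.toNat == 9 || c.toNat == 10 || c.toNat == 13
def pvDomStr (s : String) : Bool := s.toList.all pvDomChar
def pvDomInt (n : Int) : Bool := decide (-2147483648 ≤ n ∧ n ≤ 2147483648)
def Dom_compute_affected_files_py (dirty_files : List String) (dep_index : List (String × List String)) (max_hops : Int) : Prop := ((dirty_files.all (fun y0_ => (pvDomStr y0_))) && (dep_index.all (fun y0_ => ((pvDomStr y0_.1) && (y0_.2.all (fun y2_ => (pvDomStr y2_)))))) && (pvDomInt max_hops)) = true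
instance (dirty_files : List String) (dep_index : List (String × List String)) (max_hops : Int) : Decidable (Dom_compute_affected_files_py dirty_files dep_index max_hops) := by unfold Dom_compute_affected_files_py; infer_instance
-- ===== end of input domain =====

-- B replaces A's level-synchronous BFS (hop loop, frontier/next-frontier sets, break when
-- empty) by a single FIFO worklist of (file, depth) pairs (objective: alternative).
-- Both Pythons return a set; the ports list its elements in discovery (insertion) order.

-- ===== PORT A =====
-- inner body: `if dependent not in affected: next_frontier.add(dependent); affected.add(dependent)`
-- state = (affected, next_frontier)
def aInner (st : List String × List String) (d : String) : List String × List String :=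
  if d ∈ st.1 then st else (PySem.Set.add st.1 d, PySem.Set.add st.2 d)

-- `dependents = dep_index.get(file_path, set()); for dependent in dependents: …`
def aOuter (dep_index : List (String × List String)) (st : List String × List String)
    (fp : String) : List String × List String :=
  (PySem.Dict.getD (PySem.Dict.mk dep_index) fp []).foldl aInner st

-- one iteration of `for hop in range(max_hops)`: next_frontier = set(); for file_path in current_frontier: …
def passA (dep_index : List (String × List String)) (affected frontier : List String) :
    List String × List String :=
  frontier.foldl (aOuter dep_index) (affected, [])

-- the hop loop with `if not next_frontier: break`
def loopA (dep_index : List (String × List String)) :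
    Nat → List String → List String → List String
  | 0, affected, _ => affected
  | n+1, affected, frontier =>
    let st := passA dep_index affected frontier
    if st.2 = [] then st.1 else loopA dep_index n st.1 st.2

def compute_affected_files_py (dirty_files : List String)
    (dep_index : List (String × List String)) (max_hops : Int) : List String :=
  loopA dep_index max_hops.toNat (PySem.Set.ofList dirty_files) (PySem.Set.ofList dirty_files)

-- ===== PORT B =====
-- inner body of a pop: `if dependent not in affected: affected.add(dependent); queue.append((dependent, depth+1))`
-- state = (affected, items appended to the queue by this pop)
def bStep (depth : Int) (st : List String × List (String × Int)) (dep : String) :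
    List String × List (String × Int) :=
  if dep ∈ st.1 then st else (st.1 ++ [dep], st.2 ++ [(dep, depth + 1)])

-- `while queue: file_path, depth = queue.popleft(); if depth < max_hops: …`
-- The Nat fuel only makes the recursion total; compute_affected_files_py_alt passes a
-- provably sufficient amount (each enqueue matches a distinct new dependent), so the
-- fuel-0 clause is never the one that returns.
def loopQ (dep_index : List (String × List String)) (maxh : Int) :
    Nat → List (String × Int) → List String → List String
  | 0, _, affected => affected
  | _+1, [], affected => affected
  | fuel+1, (f, d) :: q, affected =>
    if d < maxh then
      loopQ dep_index maxh fuel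
        (q ++ ((PySem.Dict.getD (PySem.Dict.mk dep_index) f []).foldl (bStep d)
          (affected, ([] : List (String × Int)))).2)
        ((PySem.Dict.getD (PySem.Dict.mk dep_index) f []).foldl (bStep d)
          (affected, ([] : List (String × Int)))).1
    else loopQ dep_index maxh fuel q affected

def compute_affected_files_py_alt (dirty_files : List String)
    (dep_index : List (String × List String)) (max_hops : Int) : List String :=
  let affected := PySem.Set.ofList dirty_files
  loopQ dep_index max_hops
    (affected.length + (dep_index.flatMap (fun p => p.2)).length)
    (affected.map (fun f => (f, (0 : Int)))) affected

-- ===== PRECONDITION & SPEC =====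
def Spec_compute_affected_files_py (dirty_files : List String) (dep_index : List (String × List String)) (max_hops : Int) (out : List String) : Prop := out = compute_affected_files_py_alt dirty_files dep_index max_hops
instance (dirty_files : List String) (dep_index : List (String × List String)) (max_hops : Int) (out : List String) : Decidable (Spec_compute_affected_files_py dirty_files dep_index max_hops out) := by unfold Spec_compute_affected_files_py; infer_instance

-- ===== CLAIM (what is proved, stated in full; the proofs are below) =====
def Claim_equal_compute_affected_files_py : Prop := ∀ (dirty_files : List String) (dep_index : List (String × List String)) (max_hops : Int), Dom_compute_affected_files_py dirty_files dep_index max_hops → Spec_compute_affected_files_py dirty_files dep_index max_hops (compute_affected_files_py dirty_files dep_index max_hops)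

-- ===== LEMMAS AND PROOFS =====

-- all dependent values reachable through the index
def allDeps (dep_index : List (String × List String)) : List String :=
  dep_index.flatMap (fun p => p.2)

theorem getD_mk_subset (dep_index : List (String × List String)) (f x : String)
    (hx : x ∈ PySem.Dict.getD (PySem.Dict.mk dep_index) f []) : x ∈ allDeps dep_index := by
  unfold allDeps
  induction dep_index with
  | nil => simp [PySem.Dict.getD, PySem.Dict.get?] at hx
  | cons p rest ih =>
    obtain ⟨k, v⟩ := p
    rw [PySem.Dict.getD_eq_get?_getD, PySem.Dict.get?_mk_cons] at hx
    by_cases h : (k == f)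
    · simp [h] at hx
      exact List.mem_flatMap.mpr ⟨(k, v), by simp, hx⟩
    · rw [if_neg (by simp [h])] at hx
      simp only [List.flatMap_cons, List.mem_append]
      exact Or.inr (ih (by rw [PySem.Dict.getD_eq_get?_getD]; exact hx))

-- joint characterisation of one popped file: A's inner fold and B's bStep fold append the
-- same fresh suffix t (fresh = new, distinct, drawn from the dependents list)
theorem fold_joint (dpt : Int) (deps : List String) :
    ∀ (aff nxt : List String) (ps : List (String × Int)), (∀ x ∈ nxt, x ∈ aff) →
      ∃ t : List String,
        deps.foldl aInner (aff, nxt) = (aff ++ t, nxt ++ t) ∧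
        deps.foldl (bStep dpt) (aff, ps) = (aff ++ t, ps ++ t.map (fun x => (x, dpt + 1))) ∧
        t.Nodup ∧ (∀ x ∈ t, x ∉ aff ∧ x ∈ deps) := by
  induction deps with
  | nil => intro aff nxt ps _; exact ⟨[], by simp, by simp, by simp, by simp⟩
  | cons dp ds ih =>
    intro aff nxt ps hs
    by_cases hd : dp ∈ aff
    · obtain ⟨t, h1, h2, h3, h4⟩ := ih aff nxt ps hs
      refine ⟨t, ?_, ?_, h3, fun x hx => ⟨(h4 x hx).1, List.mem_cons_of_mem _ (h4 x hx).2⟩⟩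
      · simpa [aInner, hd] using h1
      · simpa [bStep, hd] using h2
    · have hdn : dp ∉ nxt := fun hm => hd (hs dp hm)
      obtain ⟨t, h1, h2, h3, h4⟩ := ih (aff ++ [dp]) (nxt ++ [dp]) (ps ++ [(dp, dpt + 1)])
        (by intro x hx; rcases List.mem_append.mp hx with hx | hx
            · exact List.mem_append_left _ (hs x hx)
            · exact List.mem_append_right _ hx)
      refine ⟨dp :: t, ?_, ?_, ?_, ?_⟩
      · rw [List.foldl_cons, show aInner (aff, nxt) dp
            = (aff ++ [dp], nxt ++ [dp]) by simp [aInner, hd, hdn, PySem.Set.add], h1]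
        simp
      · rw [List.foldl_cons, show bStep dpt (aff, ps) dp
            = (aff ++ [dp], ps ++ [(dp, dpt + 1)]) by simp [bStep, hd], h2]
        simp
      · exact List.nodup_cons.mpr ⟨fun hm => (h4 dp hm).1 (by simp), h3⟩
      · intro x hx
        rcases List.mem_cons.mp hx with rfl | hx
        · exact ⟨hd, List.mem_cons_self⟩
        · exact ⟨fun hm => (h4 x hx).1 (List.mem_append_left _ hm),
            List.mem_cons_of_mem _ (h4 x hx).2⟩

-- A's whole-frontier fold appends a fresh suffix of dependent values
theorem passA_decomp (dep_index : List (String × List String)) (front : List String) :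
    ∀ (aff nxt : List String), (∀ x ∈ nxt, x ∈ aff) →
      ∃ t : List String,
        front.foldl (aOuter dep_index) (aff, nxt) = (aff ++ t, nxt ++ t) ∧
        t.Nodup ∧ (∀ x ∈ t, x ∉ aff ∧ x ∈ allDeps dep_index) := by
  induction front with
  | nil => intro aff nxt _; exact ⟨[], by simp, by simp, by simp⟩
  | cons f fs ih =>
    intro aff nxt hs
    obtain ⟨t1, ha1, _, hn1, hp1⟩ :=
      fold_joint 0 (PySem.Dict.getD (PySem.Dict.mk dep_index) f []) aff nxt [] hs
    obtain ⟨t2, ha2, hn2, hp2⟩ := ih (aff ++ t1) (nxt ++ t1)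
      (by intro x hx; rcases List.mem_append.mp hx with hx | hx
          · exact List.mem_append_left _ (hs x hx)
          · exact List.mem_append_right _ hx)
    refine ⟨t1 ++ t2, ?_, ?_, ?_⟩
    · rw [List.foldl_cons, show aOuter dep_index (aff, nxt) f = (aff ++ t1, nxt ++ t1) from ha1,
        ha2]
      simp
    · exact List.Nodup.append hn1 hn2
        (fun x hx1 hx2 => (hp2 x hx2).1 (List.mem_append_right _ hx1))
    · intro x hx
      rcases List.mem_append.mp hx with hx | hx
      · exact ⟨(hp1 x hx).1, getD_mk_subset dep_index f x (hp1 x hx).2⟩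
      · exact ⟨fun hm => (hp2 x hx).1 (List.mem_append_left _ hm), (hp2 x hx).2⟩

-- potential: dependent values not yet affected
def pot (dep_index : List (String × List String)) (aff : List String) : Nat :=
  ((allDeps dep_index).toFinset \ aff.toFinset).card

theorem pot_drop (dep_index : List (String × List String)) (aff t : List String)
    (hn : t.Nodup) (ht : ∀ x ∈ t, x ∉ aff ∧ x ∈ allDeps dep_index) :
    pot dep_index (aff ++ t) + t.length = pot dep_index aff := by
  unfold pot
  have hsub : t.toFinset ⊆ (allDeps dep_index).toFinset \ aff.toFinset := by
    intro x hx
    rw [List.mem_toFinset] at hx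
    exact Finset.mem_sdiff.mpr ⟨List.mem_toFinset.mpr (ht x hx).2,
      fun hm => (ht x hx).1 (List.mem_toFinset.mp hm)⟩
  have hlen : t.toFinset.card = t.length := List.toFinset_card_of_nodup hn
  have hset : (allDeps dep_index).toFinset \ (aff ++ t).toFinset
      = ((allDeps dep_index).toFinset \ aff.toFinset) \ t.toFinset := by
    rw [List.toFinset_append]; ext x; simp; tauto
  rw [hset, ← hlen]
  exact Finset.card_sdiff_add_card_eq_card hsub

-- total number of pops B's worklist performs, mirrored on A's recursion
def pops (dep_index : List (String × List String)) :
    Nat → List String → List String → Nat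
  | 0, _, front => front.length
  | n+1, aff, front =>
    let st := passA dep_index aff front
    if st.2 = [] then front.length else front.length + pops dep_index n st.1 st.2

theorem pops_le (dep_index : List (String × List String)) :
    ∀ (n : Nat) (aff front : List String),
      pops dep_index n aff front ≤ front.length + pot dep_index aff := by
  intro n
  induction n with
  | zero => intro aff front; simp [pops]
  | succ n ih =>
    intro aff front
    obtain ⟨t, hst, hn, hp⟩ := passA_decomp dep_index front aff [] (by simp)
    show (if (passA dep_index aff front).2 = [] then front.length
        else front.length + pops dep_index n (passA dep_index aff front).1
          (passA dep_index aff front).2) ≤ _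
    rw [show passA dep_index aff front = (aff ++ t, t) by simpa [passA] using hst]
    by_cases h : t = ([] : List String)
    · simp [h]
    · rw [if_neg h]
      show front.length + pops dep_index n (aff ++ t) t ≤ front.length + pot dep_index aff
      have := ih (aff ++ t) t
      have hdrop := pot_drop dep_index aff t hn hp
      omega

theorem loopQ_nil (dep_index : List (String × List String)) (maxh : Int) (fuel : Nat)
    (aff : List String) : loopQ dep_index maxh fuel [] aff = aff := by
  cases fuel <;> rfl

-- items at a depth that allows no further hop are just drained
theorem loopQ_skip (dep_index : List (String × List String)) (maxh d : Int)
    (hd : ¬ d < maxh) (front : List String) :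
    ∀ (fuel : Nat) (aff : List String), front.length ≤ fuel →
      loopQ dep_index maxh fuel (front.map (fun f => (f, d))) aff = aff := by
  induction front with
  | nil => intro fuel aff _; exact loopQ_nil dep_index maxh fuel aff
  | cons f fs ih =>
    intro fuel aff hf
    obtain ⟨fuel', rfl⟩ : ∃ k, fuel = k + 1 := by
      cases fuel with
      | zero => simp at hf
      | succ k => exact ⟨k, rfl⟩
    show (if d < maxh then _ else loopQ dep_index maxh fuel' (fs.map (fun f => (f, d))) aff) = aff
    rw [if_neg hd]
    exact ih fuel' aff (by simpa using Nat.le_of_succ_le_succ (by simpa using hf))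

-- draining one whole level of the worklist = one frontier pass of A
theorem loopQ_level (dep_index : List (String × List String)) (maxh d : Int)
    (hd : d < maxh) (front : List String) :
    ∀ (aff nxt : List String) (fuel : Nat), (∀ x ∈ nxt, x ∈ aff) → front.length ≤ fuel →
      loopQ dep_index maxh fuel
          (front.map (fun f => (f, d)) ++ nxt.map (fun f => (f, d + 1))) aff
        = loopQ dep_index maxh (fuel - front.length)
            ((front.foldl (aOuter dep_index) (aff, nxt)).2.map (fun f => (f, d + 1)))
            (front.foldl (aOuter dep_index) (aff, nxt)).1 := by
  induction front with
  | nil => intro aff nxt fuel _ _; simp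
  | cons f fs ih =>
    intro aff nxt fuel hs hf
    obtain ⟨fuel', rfl⟩ : ∃ k, fuel = k + 1 := by
      cases fuel with
      | zero => simp at hf
      | succ k => exact ⟨k, rfl⟩
    obtain ⟨t, ha, hb, _, _⟩ :=
      fold_joint d (PySem.Dict.getD (PySem.Dict.mk dep_index) f []) aff nxt [] hs
    show (if d < maxh then _ else _) = _
    rw [if_pos hd]
    simp only [List.append_eq]
    have hq : ((fs.map (fun f => (f, d)) ++ nxt.map (fun f => (f, d + 1)))
          ++ ((PySem.Dict.getD (PySem.Dict.mk dep_index) f []).foldl (bStep d)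
            (aff, ([] : List (String × Int)))).2)
        = fs.map (fun f => (f, d)) ++ (nxt ++ t).map (fun f => (f, d + 1)) := by
      rw [hb]; simp
    rw [hq, show ((PySem.Dict.getD (PySem.Dict.mk dep_index) f []).foldl (bStep d)
        (aff, ([] : List (String × Int)))).1 = aff ++ t by rw [hb],
      ih (aff ++ t) (nxt ++ t) fuel'
        (by intro x hx; rcases List.mem_append.mp hx with hx | hx
            · exact List.mem_append_left _ (hs x hx)
            · exact List.mem_append_right _ hx)
        (by simpa using Nat.le_of_succ_le_succ (by simpa using hf)),
      List.foldl_cons, show aOuter dep_index (aff, nxt) f = (aff ++ t, nxt ++ t) from ha,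
      show (fuel' + 1) - (f :: fs).length = fuel' - fs.length from by simp]

theorem loopA_eq_loopQ (dep_index : List (String × List String)) (maxh : Int) :
    ∀ (n : Nat) (aff front : List String) (fuel : Nat),
      pops dep_index n aff front ≤ fuel →
      loopA dep_index n aff front
        = loopQ dep_index maxh fuel (front.map (fun f => (f, maxh - n))) aff := by
  intro n
  induction n with
  | zero =>
    intro aff front fuel hf
    simp only [Nat.cast_zero]
    rw [show loopA dep_index 0 aff front = aff from rfl,
      loopQ_skip dep_index maxh (maxh - 0) (by omega) front fuel aff (by simpa [pops] using hf)]
  | succ n ih =>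
    intro aff front fuel hf
    have hfl : front.length ≤ fuel := by
      have : front.length ≤ pops dep_index (n + 1) aff front := by
        show front.length ≤ (if (passA dep_index aff front).2 = [] then front.length
          else front.length + pops dep_index n (passA dep_index aff front).1
            (passA dep_index aff front).2)
        split <;> omega
      omega
    have hlevel := loopQ_level dep_index maxh (maxh - (n + 1 : Nat))
      (by push_cast; omega) front aff [] fuel (by simp) hfl
    have hd1 : (maxh - (n + 1 : Nat)) + 1 = maxh - n := by push_cast; omega
    rw [show (([] : List String).map (fun f => (f, (maxh - (n + 1 : Nat)) + 1))) = [] from rfl,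
      List.append_nil] at hlevel
    rw [hlevel]
    show (if (passA dep_index aff front).2 = [] then (passA dep_index aff front).1
        else loopA dep_index n (passA dep_index aff front).1 (passA dep_index aff front).2) = _
    have hpops : pops dep_index (n + 1) aff front
        = (if (passA dep_index aff front).2 = [] then front.length
          else front.length + pops dep_index n (passA dep_index aff front).1
            (passA dep_index aff front).2) := rfl
    by_cases h : (passA dep_index aff front).2 = []
    · rw [if_pos h]
      show _ = loopQ dep_index maxh (fuel - front.length)
        (((front.foldl (aOuter dep_index) (aff, [])).2).map _) _
      rw [show front.foldl (aOuter dep_index) (aff, ([] : List String))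
          = passA dep_index aff front from rfl, h]
      exact (loopQ_nil dep_index maxh _ _).symm
    · rw [if_neg h]
      rw [show front.foldl (aOuter dep_index) (aff, ([] : List String))
          = passA dep_index aff front from rfl] at hlevel ⊢
      rw [ih (passA dep_index aff front).1 (passA dep_index aff front).2 (fuel - front.length)
        (by rw [hpops, if_neg h] at hf; omega)]
      rw [hd1]

-- ===== VERDICT (by name: the statement is the Claim_ definition above) =====
theorem compute_affected_files_py_spec : Claim_equal_compute_affected_files_py := by
  intro dirty_files dep_index max_hops _
  show compute_affected_files_py dirty_files dep_index max_hops
      = compute_affected_files_py_alt dirty_files dep_index max_hops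
  unfold compute_affected_files_py compute_affected_files_py_alt
  set aff := PySem.Set.ofList dirty_files with haff
  set fuel := aff.length + (dep_index.flatMap (fun p => p.2)).length with hfuel
  by_cases hmh : 0 ≤ max_hops
  · have hle : pops dep_index max_hops.toNat aff aff ≤ fuel := by
      have h1 := pops_le dep_index max_hops.toNat aff aff
      have h2 : pot dep_index aff ≤ (dep_index.flatMap (fun p => p.2)).length := by
        calc pot dep_index aff ≤ (allDeps dep_index).toFinset.card :=
              Finset.card_le_card (Finset.sdiff_subset)
          _ ≤ (allDeps dep_index).length := List.toFinset_card_le _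
          _ = (dep_index.flatMap (fun p => p.2)).length := rfl
      omega
    rw [loopA_eq_loopQ dep_index max_hops max_hops.toNat aff aff fuel hle,
      show max_hops - (max_hops.toNat : Int) = 0 by omega]
  · rw [show max_hops.toNat = 0 from by omega,
      show loopA dep_index 0 aff aff = aff from rfl,
      loopQ_skip dep_index max_hops 0 (by omega) aff fuel aff (by omega)]
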